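-- pv_equiv track=rewrite | github.com/sheauren/ez_zk_client | ez_zk_client/__init__.py | __get_unused_pool_symbol
-- ===== SOURCE A (Python) =====
-- __symbol = "123456789ABCDEFGHIJKLMNOPQRSTUVWXYZ"  # 35
--
-- def __get_unused_pool_symbol(used_symbol: list, max_len: int):
--     if max_len > 35:
--         return Exception("pool size must len")
--     all_symbol = __symbol[:max_len]
--     for s in all_symbol[::-1]:
--         if s not in used_symbol:
--             return s
--     raise Exception("all symbol are used")
-- ===== SOURCE B (Python) =====
-- __symbol = "123456789ABCDEFGHIJKLMNOPQRSTUVWXYZ"  # 35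
--
--
-- def __get_unused_pool_symbol(used_symbol: list, max_len: int):
--     if max_len > 35:
--         return Exception("pool size must len")
--     unused = set(__symbol[:max_len]) - set(used_symbol)
--     if not unused:
--         raise Exception("all symbol are used")
--     return max(unused, key=__symbol.index)
-- ===== Notes on version B (the rewrite author's own statement) =====
-- stated objective: simpler
-- what changed: A scans the first max_len pool symbols in reverse and early-returns the first one absent from used_symbol; B instead builds the set difference unused = set(__symbol[:max_len]) - set(used_symbol) and returns max(unused, key=__symbol.index), raising the same Exception when the difference is empty.
import Mathlib
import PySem

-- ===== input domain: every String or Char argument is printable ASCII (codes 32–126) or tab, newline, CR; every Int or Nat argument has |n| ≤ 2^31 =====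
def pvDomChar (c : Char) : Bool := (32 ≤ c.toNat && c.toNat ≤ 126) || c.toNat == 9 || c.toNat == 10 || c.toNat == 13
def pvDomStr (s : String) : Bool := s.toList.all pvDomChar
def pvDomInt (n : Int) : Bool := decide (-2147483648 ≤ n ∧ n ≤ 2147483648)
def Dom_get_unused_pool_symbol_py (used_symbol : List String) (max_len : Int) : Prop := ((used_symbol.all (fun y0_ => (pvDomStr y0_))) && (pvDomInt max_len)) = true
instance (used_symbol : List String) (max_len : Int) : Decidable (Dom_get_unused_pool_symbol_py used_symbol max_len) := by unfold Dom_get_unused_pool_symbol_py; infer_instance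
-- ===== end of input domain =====

-- B replaces A's reverse scan with early return by a set difference (unused = set(prefix) - set(used))
-- followed by max(unused, key=__symbol.index); equivalence of the RETURN value is proved on Pre_.

-- the module constant __symbol = "123456789ABCDEFGHIJKLMNOPQRSTUVWXYZ", as its character list
def pvSym : List Char := ['1','2','3','4','5','6','7','8','9','A','B','C','D','E','F','G','H','I','J','K','L','M','N','O','P','Q','R','S','T','U','V','W','X','Y','Z']

-- iterating a Python str yields its characters as 1-character strings
def pvToSym (c : Char) : String := String.ofList [c]

-- ===== PORT A =====
-- the 'for s in all_symbol[::-1]: if s not in used_symbol: return s' loop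
-- (falls off the end = Python raises Exception("all symbol are used"); "" there, excluded by Pre_)
def pvScanA (used : List String) : List Char → String
  | [] => ""
  | c :: rest => if used.contains (pvToSym c) then pvScanA used rest else pvToSym c

def get_unused_pool_symbol_py (used_symbol : List String) (max_len : Int) : String :=
  if max_len > 35 then ""  -- Python RETURNS Exception("pool size must len"), not a str; excluded by Pre_
  else
    -- all_symbol = __symbol[:max_len]; all_symbol[::-1] is its reverse (PySem.List.slice?_none_none_neg_one)
    pvScanA used_symbol (PySem.List.slice pvSym none (some max_len)).reverse

-- ===== PORT B =====
def pvSymS : List String := pvSym.map pvToSym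

-- key=__symbol.index; its argument is always a character of __symbol, so .index never raises (getD 0 unreached)
def pvKey (s : String) : Nat := (PySem.List.index? pvSymS s).getD 0

def get_unused_pool_symbol_py_alt (used_symbol : List String) (max_len : Int) : String :=
  if max_len > 35 then ""  -- Python RETURNS Exception("pool size must len"), not a str; excluded by Pre_
  else
    let unused : PySem.Set String :=
      PySem.Set.diff (PySem.Set.ofList ((PySem.List.slice pvSym none (some max_len)).map pvToSym))
        (PySem.Set.ofList used_symbol)
    match PySem.List.max? unused pvKey with
    | some s => s
    | none => ""  -- Python raises Exception("all symbol are used"); excluded by Pre_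

-- ===== PRECONDITION & SPEC =====
-- Pre_ excludes max_len > 35, where A RETURNS an Exception object (not a str), and inputs whose first
-- max_len symbols are all used, where A RAISES Exception("all symbol are used").
def Pre_get_unused_pool_symbol_py (used_symbol : List String) (max_len : Int) : Prop :=
  max_len ≤ 35 ∧ (PySem.List.slice pvSym none (some max_len)).any (fun c => !used_symbol.contains (pvToSym c)) = true
instance (used_symbol : List String) (max_len : Int) : Decidable (Pre_get_unused_pool_symbol_py used_symbol max_len) := by unfold Pre_get_unused_pool_symbol_py; infer_instance

def pvWitness_get_unused_pool_symbol_py : List String × Int := (["1", "4"], 5)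

def Spec_get_unused_pool_symbol_py (used_symbol : List String) (max_len : Int) (out : String) : Prop := out = get_unused_pool_symbol_py_alt used_symbol max_len
instance (used_symbol : List String) (max_len : Int) (out : String) : Decidable (Spec_get_unused_pool_symbol_py used_symbol max_len out) := by unfold Spec_get_unused_pool_symbol_py; infer_instance

-- ===== CLAIM (what is proved, stated in full; the proofs are below) =====
def Claim_equal_get_unused_pool_symbol_py : Prop := ∀ (used_symbol : List String) (max_len : Int), Dom_get_unused_pool_symbol_py used_symbol max_len → Pre_get_unused_pool_symbol_py used_symbol max_len → Spec_get_unused_pool_symbol_py used_symbol max_len (get_unused_pool_symbol_py used_symbol max_len)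

-- ===== LEMMAS AND PROOFS =====

theorem pvToSym_inj : Function.Injective pvToSym := by
  intro c d h
  have := congrArg String.toList h
  simpa [pvToSym] using this

-- A's loop returns the first element of its list that is not in used_symbol
theorem pvScanA_eq_find (used : List String) (l : List Char) :
    pvScanA used l =
      match l.find? (fun c => !used.contains (pvToSym c)) with
      | some c => pvToSym c
      | none => "" := by
  induction l with
  | nil => rfl
  | cons c rest ih =>
    by_cases h : pvToSym c ∈ used
    · simp [pvScanA, List.find?, h, ih]
    · simp [pvScanA, List.find?, h]

-- set(xs) of a duplicate-free list is that list
theorem set_ofList_of_nodup {α : Type} [BEq α] [LawfulBEq α] (l : List α) (h : l.Nodup) :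
    PySem.Set.ofList l = l := by
  suffices H : ∀ (s : List α), l.Nodup → (∀ x ∈ l, x ∉ s) → l.foldl PySem.Set.add s = s ++ l by
    simpa [PySem.Set.ofList, PySem.Set.empty] using H [] h (by simp)
  clear h
  induction l with
  | nil => intro s _ _; simp
  | cons a t ih =>
    intro s hnd hdisj
    have ha : a ∉ s := hdisj a (List.mem_cons_self)
    have step : PySem.Set.add s a = s ++ [a] := by
      simp [PySem.Set.add, List.contains_eq_mem, ha]
    have hnd' : t.Nodup := (List.nodup_cons.mp hnd).2
    have hna : a ∉ t := (List.nodup_cons.mp hnd).1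
    have hdisj' : ∀ x ∈ t, x ∉ s ++ [a] := by
      intro x hx
      simp only [List.mem_append, List.mem_singleton]
      rintro (hs | rfl)
      · exact hdisj x (by simp [hx]) hs
      · exact hna hx
    calc (a :: t).foldl PySem.Set.add s = t.foldl PySem.Set.add (s ++ [a]) := by
          simp [List.foldl_cons, step]
      _ = (s ++ [a]) ++ t := ih (s ++ [a]) hnd' hdisj'
      _ = s ++ a :: t := by simp

-- on a list strictly increasing under pvKey, Python's max(·, key=…) is the last element
theorem max?_eq_getLast (L : List String)
    (hP : L.Pairwise (fun x y => pvKey x < pvKey y)) (hne : L ≠ []) :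
    PySem.List.max? L pvKey = L.getLast? := by
  obtain ⟨m, hm⟩ : ∃ m, PySem.List.max? L pvKey = some m := by
    rcases h : PySem.List.max? L pvKey with _ | m
    · exact absurd ((PySem.List.max?_eq_none_iff L pvKey).mp h) hne
    · exact ⟨m, rfl⟩
  have hmem := PySem.List.max?_mem hm
  have hmax := PySem.List.max?_isMax hm
  set g := L.getLast hne with hg
  have hsplit : L.dropLast ++ [g] = L := List.dropLast_append_getLast hne
  have hglast : L.getLast? = some g := List.getLast?_eq_some_getLast hne
  have hlt : ∀ y ∈ L.dropLast, pvKey y < pvKey g := by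
    have := hsplit ▸ hP
    rw [List.pairwise_append] at this
    intro y hy
    exact this.2.2 y hy g (by simp)
  have hmg : m = g := by
    rcases (by rw [← hsplit] at hmem; simpa using hmem : m ∈ L.dropLast ∨ m = g) with h1 | h1
    · have h2 := hlt m h1
      have h3 := hmax g (by rw [← hsplit]; simp)
      omega
    · exact h1
  rw [hm, hmg, hglast]

-- the 35 pool symbols have strictly increasing indices in __symbol
theorem pvSymS_pairwise : pvSymS.Pairwise (fun x y => pvKey x < pvKey y) := by decide

theorem pvSym_nodup : pvSym.Nodup := by decide

theorem get_unused_pool_symbol_py_spec_aux (used_symbol : List String) (max_len : Int)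
    (hpre : Pre_get_unused_pool_symbol_py used_symbol max_len) :
    get_unused_pool_symbol_py used_symbol max_len = get_unused_pool_symbol_py_alt used_symbol max_len := by
  obtain ⟨hle, hany⟩ := hpre
  rw [List.any_eq_true] at hany
  obtain ⟨c0, hc0mem, hc0un⟩ := hany
  have hnot : ¬ max_len > 35 := by omega
  set pre := PySem.List.slice pvSym none (some max_len) with hpredef
  set pc : Char → Bool := fun c => !used_symbol.contains (pvToSym c) with hpc
  set fl := pre.filter pc with hfl
  -- the filtered prefix is nonempty
  have hc0pc : pc c0 = true := hc0un
  have hflne : fl ≠ [] := by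
    intro h
    have : c0 ∈ fl := List.mem_filter.mpr ⟨hc0mem, hc0pc⟩
    simp [h] at this
  -- pre is a prefix (hence sublist) of pvSym
  have hpresub : pre.Sublist pvSym := by
    have : pre = pvSym.take (PySem.List.clampIdx pvSym.length max_len) := by
      simp [hpredef, PySem.List.slice]
    rw [this]; exact List.take_sublist _ _
  -- A's side: last element of the filtered prefix
  have hA : get_unused_pool_symbol_py used_symbol max_len =
      match fl.getLast? with | some c => pvToSym c | none => "" := by
    rw [get_unused_pool_symbol_py, if_neg hnot, pvScanA_eq_find]
    rw [show (PySem.List.slice pvSym none (some max_len)) = pre from rfl]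
    rw [show pre.reverse.find? (fun c => !used_symbol.contains (pvToSym c)) = fl.getLast? by
      rw [← List.head?_filter, List.filter_reverse, List.head?_reverse]]
  -- B's side: the set difference is (map of) the filtered prefix
  have hnodup : (pre.map pvToSym).Nodup :=
    ((pvSym_nodup.sublist hpresub).map pvToSym_inj)
  have hofList : PySem.Set.ofList (pre.map pvToSym) = pre.map pvToSym :=
    set_ofList_of_nodup _ hnodup
  have hunused : PySem.Set.diff (PySem.Set.ofList (pre.map pvToSym)) (PySem.Set.ofList used_symbol)
      = fl.map pvToSym := by
    rw [PySem.Set.diff, hofList, List.filter_map, hfl]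
    congr 1
    apply List.filter_congr
    intro c _
    simp [Function.comp, hpc, PySem.Set.mem_ofList]
  -- the filtered mapped prefix is strictly increasing under pvKey
  have hPW : (fl.map pvToSym).Pairwise (fun x y => pvKey x < pvKey y) := by
    have hsub : (fl.map pvToSym).Sublist pvSymS :=
      ((List.filter_sublist (p := pc)).trans hpresub).map pvToSym
    exact pvSymS_pairwise.sublist hsub
  have hmapne : fl.map pvToSym ≠ [] := by simpa using hflne
  have hB : get_unused_pool_symbol_py_alt used_symbol max_len =
      match fl.getLast? with | some c => pvToSym c | none => "" := by
    rw [get_unused_pool_symbol_py_alt, if_neg hnot]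
    simp only [← hpredef, hunused, max?_eq_getLast _ hPW hmapne, List.getLast?_map]
    rcases fl.getLast? with _ | c <;> rfl
  rw [hA, hB]

-- ===== VERDICT (by name: the statement is the Claim_ definition above) =====
theorem get_unused_pool_symbol_py_spec : Claim_equal_get_unused_pool_symbol_py := by
  intro used_symbol max_len _ hpre
  unfold Spec_get_unused_pool_symbol_py
  exact get_unused_pool_symbol_py_spec_aux used_symbol max_len hpre
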